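-- pv_equiv track=rewrite | github.com/mozilla-it/fx-sentiment-analysis | support_functions.py | find_word_pair_in_text
-- ===== SOURCE A (Python) =====
-- def find_word_pair_in_text(text, word1, word2, distance=5):
--     """
--     The function check if two words are present in the given text within the given distance
--     outputs:
--     - found: boolean, if the two words are found
--     indices as the word pair may present for more than once
--     """
--     found = False
--     for i in range(len(text)):
--         if text[i] == word1:  # Find the first word
--             for j in range(max(i - distance, 0), min(i + distance, len(text))):
--                 if text[j] == word2:  # Find the second word in the neighbours
--                     found = True
--                     return found
--     return found
-- ===== SOURCE B (Python) =====
-- def find_word_pair_in_text(text, word1, word2, distance=5):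
--     """
--     The function check if two words are present in the given text within the given distance
--     outputs:
--     - found: boolean, if the two words are found
--     indices as the word pair may present for more than once
--     """
--     # Single pass: remember the last index at which each word was seen and
--     # test the window condition incrementally instead of rescanning a window.
--     last1 = None
--     last2 = None
--     for k, w in enumerate(text):
--         if w == word2:
--             last2 = k
--         if w == word1:
--             if last2 is not None and k - distance <= last2 < k + distance:
--                 return True
--             last1 = k
--         if w == word2 and last1 is not None and last1 - distance <= k < last1 + distance:
--             return True
--     return False
-- ===== Notes on version B (the rewrite author's own statement) =====
-- stated objective: alternative
-- what changed: Replaced the nested scan of a +/-distance window around every occurrence of word1 by a single pass over the text that remembers the last seen index of each word and tests the distance condition incrementally.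
import Mathlib
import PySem

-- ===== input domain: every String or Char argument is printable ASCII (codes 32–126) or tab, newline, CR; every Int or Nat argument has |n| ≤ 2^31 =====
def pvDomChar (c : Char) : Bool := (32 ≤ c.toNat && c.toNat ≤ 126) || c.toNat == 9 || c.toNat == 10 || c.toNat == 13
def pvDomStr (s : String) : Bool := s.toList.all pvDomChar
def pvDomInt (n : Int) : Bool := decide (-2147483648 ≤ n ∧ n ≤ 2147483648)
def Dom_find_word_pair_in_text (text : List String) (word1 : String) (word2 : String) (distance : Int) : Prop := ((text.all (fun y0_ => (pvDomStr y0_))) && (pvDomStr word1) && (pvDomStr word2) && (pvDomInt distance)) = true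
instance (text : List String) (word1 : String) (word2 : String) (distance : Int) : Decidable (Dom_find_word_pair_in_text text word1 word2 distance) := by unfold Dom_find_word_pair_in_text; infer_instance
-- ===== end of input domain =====

-- B replaces A's nested window scan by a single pass that remembers the last
-- index at which each word was seen; equal return value on all inputs (A is total).

-- ===== PORT A =====
-- A: for i in range(len(text)): if text[i]==word1: for j in range(max(i-distance,0), min(i+distance,len(text))):
--    if text[j]==word2: return True; finally return False.  Early return = List.any.
-- Indices produced by the ranges are always in bounds, so text[i] is pyGetD with an unreachable default.
def find_word_pair_in_text (text : List String) (word1 : String) (word2 : String) (distance : Int) : Bool :=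
  (PySem.List.pyRange 0 (text.length : Int) 1).any (fun i =>
    if PySem.List.pyGetD text i "" == word1 then
      (PySem.List.pyRange (max (i - distance) 0) (min (i + distance) (text.length : Int)) 1).any
        (fun j => PySem.List.pyGetD text j "" == word2)
    else false)

-- ===== PORT B =====
-- 'k - distance <= last2 < k + distance' (Source B)
def fwptWithin (d : Int) (i j : Nat) : Bool := decide ((i : Int) - d ≤ (j : Int) ∧ (j : Int) < (i : Int) + d)

-- The 'for k, w in enumerate(text)' loop of Source B with early return, as index-threading
-- structural recursion; last1/last2 are the 'None'-initialised last-seen indices.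
def fwptGo (word1 word2 : String) (d : Int) : List String → Nat → Option Nat → Option Nat → Bool
  | [], _, _, _ => false
  | w :: rest, k, last1, last2 =>
    let last2' := if w == word2 then some k else last2
    if w == word1 && last2'.any (fun j => fwptWithin d k j) then true
    else
      let last1' := if w == word1 then some k else last1
      if w == word2 && last1'.any (fun i => fwptWithin d i k) then true
      else fwptGo word1 word2 d rest (k + 1) last1' last2'

def find_word_pair_in_text_alt (text : List String) (word1 : String) (word2 : String) (distance : Int) : Bool :=
  fwptGo word1 word2 distance text 0 none none

-- ===== PRECONDITION & SPEC =====
def Spec_find_word_pair_in_text (text : List String) (word1 : String) (word2 : String) (distance : Int) (out : Bool) : Prop := out = find_word_pair_in_text_alt text word1 word2 distance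
instance (text : List String) (word1 : String) (word2 : String) (distance : Int) (out : Bool) : Decidable (Spec_find_word_pair_in_text text word1 word2 distance out) := by unfold Spec_find_word_pair_in_text; infer_instance

-- ===== CLAIM (what is proved, stated in full; the proofs are below) =====
def Claim_equal_find_word_pair_in_text : Prop := ∀ (text : List String) (word1 : String) (word2 : String) (distance : Int), Dom_find_word_pair_in_text text word1 word2 distance → Spec_find_word_pair_in_text text word1 word2 distance (find_word_pair_in_text text word1 word2 distance)

-- ===== LEMMAS AND PROOFS =====

-- The common specification: indices i, j of word1, word2 with j in A's window around i.
def fwptPair (text : List String) (word1 word2 : String) (d : Int) (i j : Nat) : Prop :=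
  i < text.length ∧ j < text.length ∧ text.getD i "" = word1 ∧ text.getD j "" = word2 ∧
  (i : Int) - d ≤ (j : Int) ∧ (j : Int) < (i : Int) + d

lemma A_iff (text : List String) (word1 word2 : String) (d : Int) :
    find_word_pair_in_text text word1 word2 d = true ↔
      ∃ i j, fwptPair text word1 word2 d i j := by
  unfold find_word_pair_in_text
  rw [List.any_eq_true]
  constructor
  · rintro ⟨i, hi, hbody⟩
    rw [PySem.List.mem_pyRange_one] at hi
    split at hbody
    · rename_i h1
      rw [List.any_eq_true] at hbody
      obtain ⟨j, hj, h2⟩ := hbody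
      rw [PySem.List.mem_pyRange_one] at hj
      rw [PySem.List.pyGetD_eq_getElem text _ (by omega) (by omega)] at h1 h2
      simp only [beq_iff_eq] at h1 h2
      refine ⟨i.toNat, j.toNat, by omega, by omega, ?_, ?_, by omega, by omega⟩
      · rw [List.getD_eq_getElem text "" (by omega)]; exact h1
      · rw [List.getD_eq_getElem text "" (by omega)]; exact h2
    · exact absurd hbody (by simp)
  · rintro ⟨i, j, hi, hj, hw1, hw2, hlo, hhi⟩
    refine ⟨(i : Int), by rw [PySem.List.mem_pyRange_one]; omega, ?_⟩
    have g1 : PySem.List.pyGetD text (i : Int) "" = word1 := by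
      rw [PySem.List.pyGetD_natCast]; exact hw1
    rw [g1]
    simp only [BEq.rfl, if_true]
    rw [List.any_eq_true]
    refine ⟨(j : Int), by rw [PySem.List.mem_pyRange_one]; omega, ?_⟩
    have g2 : PySem.List.pyGetD text (j : Int) "" = word2 := by
      rw [PySem.List.pyGetD_natCast]; exact hw2
    rw [g2]
    simp

-- last-seen invariant: o is the index of the last occurrence of w before position k (none if none)
def fwptLast (text : List String) (w : String) (k : Nat) (o : Option Nat) : Prop :=
  match o with
  | none => ∀ i, i < k → text.getD i "" ≠ w
  | some m => m < k ∧ text.getD m "" = w ∧ ∀ i, m < i → i < k → text.getD i "" ≠ w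

lemma fwptLast_step (text : List String) (w v : String) (k : Nat) (o : Option Nat)
    (hk : text.getD k "" = v) (h : fwptLast text w k o) :
    fwptLast text w (k + 1) (if v == w then some k else o) := by
  by_cases hv : v = w
  · simp only [hv, BEq.rfl, if_true, fwptLast]
    refine ⟨by omega, by rw [hk, hv], fun i h1 h2 => by omega⟩
  · rw [if_neg (by simpa using hv)]
    match o with
    | none =>
      intro i h1
      rcases Nat.lt_succ_iff_lt_or_eq.mp h1 with h1 | h1
      · exact h i h1
      · subst h1; rw [hk]; simpa using hv
    | some m =>
      obtain ⟨hm1, hm2, hm3⟩ := h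
      refine ⟨by omega, hm2, fun i h1 h2 => ?_⟩
      rcases Nat.lt_succ_iff_lt_or_eq.mp h2 with h2 | h2
      · exact hm3 i h1 h2
      · subst h2; rw [hk]; simpa using hv

-- an occurrence of w before k forces the last-seen index to exist and bound it from above
lemma fwptLast_of_occ (text : List String) (w : String) (k : Nat) (o : Option Nat)
    (h : fwptLast text w k o) (j : Nat) (hj : j < k) (hw : text.getD j "" = w) :
    ∃ m, o = some m ∧ j ≤ m ∧ m < k ∧ text.getD m "" = w := by
  match o with
  | none => exact absurd hw (h j hj)
  | some m =>
    obtain ⟨hm1, hm2, hm3⟩ := h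
    refine ⟨m, rfl, ?_, hm1, hm2⟩
    by_contra hc
    exact hm3 j (by omega) hj hw

lemma opt_any_iff (f : Nat → Bool) (o : Option Nat) :
    o.any f = true ↔ ∃ m, o = some m ∧ f m = true := by
  cases o <;> simp

lemma go_iff (text : List String) (word1 word2 : String) (d : Int) :
    ∀ (rest : List String) (k : Nat) (l1 l2 : Option Nat),
      k + rest.length = text.length → rest = text.drop k →
      fwptLast text word1 k l1 → fwptLast text word2 k l2 →
      (fwptGo word1 word2 d rest k l1 l2 = true ↔
        ∃ i j, fwptPair text word1 word2 d i j ∧ (k ≤ i ∨ k ≤ j)) := by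
  intro rest
  induction rest with
  | nil =>
    intro k l1 l2 hlen _ _ _
    simp only [fwptGo, Bool.false_eq_true, false_iff]
    rintro ⟨i, j, hp, hk⟩
    have hi : i < text.length := hp.1
    have hj : j < text.length := hp.2.1
    simp at hlen; omega
  | cons w rest ih =>
    intro k l1 l2 hlen hdrop h1 h2
    have hkn : k < text.length := by simp at hlen; omega
    have hk : text.getD k "" = w := by
      have h0 : (text.drop k)[0]? = some w := by rw [← hdrop]; rfl
      rw [List.getElem?_drop, Nat.add_zero] at h0
      simp [List.getD_eq_getElem?_getD, h0]
    have h2' : fwptLast text word2 (k + 1) (if w == word2 then some k else l2) :=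
      fwptLast_step text word2 w k l2 hk h2
    have h1' : fwptLast text word1 (k + 1) (if w == word1 then some k else l1) :=
      fwptLast_step text word1 w k l1 hk h1
    rw [fwptGo]
    by_cases c1 : (w == word1 && (if w == word2 then some k else l2).any (fun j => fwptWithin d k j)) = true
    · rw [if_pos c1]
      simp only [true_iff]
      obtain ⟨hw1, hchk⟩ := Bool.and_eq_true_iff.mp c1
      obtain ⟨j, hj, hwin⟩ := (opt_any_iff _ _).mp hchk
      have hl : fwptLast text word2 (k+1) (some j) := by rwa [hj] at h2'
      obtain ⟨hj1, hj2, _⟩ := hl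
      refine ⟨k, j, ⟨hkn, by omega, by rw [hk]; exact (beq_iff_eq.mp hw1), hj2, ?_, ?_⟩, Or.inl le_rfl⟩ <;>
        · have := of_decide_eq_true hwin; omega
    · rw [if_neg c1]
      by_cases c2 : (w == word2 && (if w == word1 then some k else l1).any (fun i => fwptWithin d i k)) = true
      · rw [if_pos c2]
        simp only [true_iff]
        obtain ⟨hw2, hchk⟩ := Bool.and_eq_true_iff.mp c2
        obtain ⟨i, hi, hwin⟩ := (opt_any_iff _ _).mp hchk
        have hl : fwptLast text word1 (k+1) (some i) := by rwa [hi] at h1'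
        obtain ⟨hi1, hi2, _⟩ := hl
        refine ⟨i, k, ⟨by omega, hkn, hi2, by rw [hk]; exact (beq_iff_eq.mp hw2), ?_, ?_⟩, Or.inr le_rfl⟩ <;>
          · have := of_decide_eq_true hwin; omega
      · rw [if_neg c2]
        have hdrop' : rest = text.drop (k + 1) := by
          have : text.drop (k + 1) = (text.drop k).drop 1 := by
            rw [List.drop_drop]
          rw [this, ← hdrop]
          rfl
        rw [ih (k+1) _ _ (by simp at hlen ⊢; omega) hdrop' h1' h2']
        constructor
        · rintro ⟨i, j, hp, hkij⟩
          exact ⟨i, j, hp, by omega⟩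
        · rintro ⟨i, j, hp, hkij⟩
          refine ⟨i, j, hp, ?_⟩
          -- rule out max i j = k : it would have fired c1 or c2
          by_contra hc
          rw [not_or] at hc
          obtain ⟨hc1, hc2⟩ := hc
          have hpU := hp
          unfold fwptPair at hpU
          obtain ⟨hi, hj, hw1, hw2, hlo, hhi⟩ := hpU
          have hik : i ≤ k := by omega
          have hjk : j ≤ k := by omega
          have : i = k ∨ j = k := by omega
          rcases this with hik' | hjk'
          · -- i = k: check1 must fire
            have hww : w = word1 := by rw [hik', hk] at hw1; exact hw1
            obtain ⟨m, hm, hjm, hmk, hmw⟩ :=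
              fwptLast_of_occ text word2 (k+1) _ h2' j (by omega) hw2
            apply c1
            rw [Bool.and_eq_true_iff]
            refine ⟨by simpa using hww, ?_⟩
            rw [hm]
            simp only [Option.any_some]
            unfold fwptWithin
            exact decide_eq_true (by omega)
          · -- j = k: check2 must fire
            have hww : w = word2 := by rw [hjk', hk] at hw2; exact hw2
            obtain ⟨m, hm, him, hmk, hmw⟩ :=
              fwptLast_of_occ text word1 (k+1) _ h1' i (by omega) hw1
            apply c2
            rw [Bool.and_eq_true_iff]
            refine ⟨by simpa using hww, ?_⟩
            rw [hm]
            simp only [Option.any_some]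
            unfold fwptWithin
            exact decide_eq_true (by omega)

lemma B_iff (text : List String) (word1 word2 : String) (d : Int) :
    find_word_pair_in_text_alt text word1 word2 d = true ↔
      ∃ i j, fwptPair text word1 word2 d i j := by
  unfold find_word_pair_in_text_alt
  rw [go_iff text word1 word2 d text 0 none none (by simp) (by simp)
    (fun i h => by omega) (fun i h => by omega)]
  constructor
  · rintro ⟨i, j, hp, _⟩; exact ⟨i, j, hp⟩
  · rintro ⟨i, j, hp⟩; exact ⟨i, j, hp, Or.inl (Nat.zero_le i)⟩

-- ===== VERDICT (by name: the statement is the Claim_ definition above) =====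
theorem find_word_pair_in_text_spec : Claim_equal_find_word_pair_in_text := by
  intro text word1 word2 distance _
  unfold Spec_find_word_pair_in_text
  have := (A_iff text word1 word2 distance).trans (B_iff text word1 word2 distance).symm
  cases hA : find_word_pair_in_text text word1 word2 distance <;>
  cases hB : find_word_pair_in_text_alt text word1 word2 distance <;>
    simp_all
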